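-- pv_equiv track=rewrite | github.com/elami018/CSCI_5523 | HW2/task1.py | lexicographic_ordering
-- ===== SOURCE A (Python) =====
-- def lexicographic_ordering(lst):
--
--     def group_by_length(lst):
--         length_dict = {}
--         for elem in lst:
--             length = len(elem)
--             if length not in length_dict:
--                 length_dict[length] = [elem]
--             else:
--                 length_dict[length].append(elem)
--         return list(length_dict.values())
--
--     def string_sorting(lst):
--         for sublist in lst:
--             sublist.sort()
--         return lst
--
--     return string_sorting(group_by_length(lst))
-- ===== SOURCE B (Python) =====
-- def lexicographic_ordering(lst):
--     seen = set()
--     order = []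
--     for e in lst:
--         l = len(e)
--         if l not in seen:
--             seen.add(l)
--             order.append(l)
--     return [sorted(x for x in lst if len(x) == l) for l in order]
-- ===== Notes on version B (the rewrite author's own statement) =====
-- stated objective: alternative
-- what changed: Replaces the single-pass dict bucketing + in-place per-bucket sort with a first pass that indexes the distinct lengths in first-appearance order, then a comprehension that sorts a fresh filter of the input for each length.
import Mathlib
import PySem

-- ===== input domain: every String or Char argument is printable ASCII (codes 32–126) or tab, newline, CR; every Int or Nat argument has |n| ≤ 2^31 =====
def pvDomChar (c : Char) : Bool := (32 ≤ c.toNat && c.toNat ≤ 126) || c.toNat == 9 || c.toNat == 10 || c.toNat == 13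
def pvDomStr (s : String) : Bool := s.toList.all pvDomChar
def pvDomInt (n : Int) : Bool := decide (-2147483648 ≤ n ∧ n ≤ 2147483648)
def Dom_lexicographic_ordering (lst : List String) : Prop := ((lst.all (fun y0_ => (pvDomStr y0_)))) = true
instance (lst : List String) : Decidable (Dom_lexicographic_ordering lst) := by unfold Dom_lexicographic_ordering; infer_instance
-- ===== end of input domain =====

-- B replaces dict bucketing by a length index + per-length filtered sorts; objective: alternative decomposition (same output).

-- ===== PORT A =====
-- group_by_length: dict from length to bucket, first-insertion key order
def lexGroupByLength (lst : List String) : List (List String) :=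
  (lst.foldl (fun (d : PySem.Dict Int (List String)) elem =>
      let length := PySem.Str.len elem
      if !(d.contains length) then d.insert length [elem]
      else d.modify length [] (fun v => v ++ [elem])) PySem.Dict.empty).values

-- string_sorting: sort each sublist (in place in Python; returned value is what we model)
def lexStringSorting (l : List (List String)) : List (List String) :=
  l.map (fun sub => PySem.List.sorted sub (fun x => x) false)

def lexicographic_ordering (lst : List String) : List (List String) :=
  lexStringSorting (lexGroupByLength lst)

-- ===== PORT B =====
def lexicographic_ordering_alt (lst : List String) : List (List String) :=
  let st := lst.foldl (fun (st : PySem.Set Int × List Int) e =>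
      let l := PySem.Str.len e
      if st.1.contains l then st else (PySem.Set.add st.1 l, st.2 ++ [l]))
    (PySem.Set.empty, [])
  st.2.map (fun l =>
    PySem.List.sorted (lst.filter (fun x => PySem.Str.len x == l)) (fun x => x) false)

-- ===== PRECONDITION & SPEC =====
def Spec_lexicographic_ordering (lst : List String) (out : List (List String)) : Prop := out = lexicographic_ordering_alt lst
instance (lst : List String) (out : List (List String)) : Decidable (Spec_lexicographic_ordering lst out) := by unfold Spec_lexicographic_ordering; infer_instance

-- ===== CLAIM (what is proved, stated in full; the proofs are below) =====
def Claim_equal_lexicographic_ordering : Prop := ∀ (lst : List String), Dom_lexicographic_ordering lst → Spec_lexicographic_ordering lst (lexicographic_ordering lst)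

-- ===== LEMMAS AND PROOFS =====

-- A's insert/append branch is exactly Dict.modify
lemma lexA_step_eq_modify (d : PySem.Dict Int (List String)) (e : String) :
    (if !(d.contains (PySem.Str.len e)) then d.insert (PySem.Str.len e) [e]
     else d.modify (PySem.Str.len e) [] (fun v => v ++ [e]))
    = d.modify (PySem.Str.len e) [] (fun v => v ++ [e]) := by
  cases h : d.contains (PySem.Str.len e) with
  | true => simp only [Bool.not_true, Bool.false_eq_true, if_false]
  | false =>
    have hg : d.get? (PySem.Str.len e) = none :=
      (PySem.Dict.get?_eq_none_iff_contains d _).mpr h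
    have hd : d.getD (PySem.Str.len e) [] = [] := by
      rw [PySem.Dict.getD, hg]; rfl
    rw [PySem.Dict.modify, hd]
    simp only [Bool.not_false, if_true, List.nil_append]

-- A's dict fold, seen as a fold over (length, elem) pairs
lemma lexA_dict_eq (lst : List String) :
    (lst.foldl (fun (d : PySem.Dict Int (List String)) elem =>
      let length := PySem.Str.len elem
      if !(d.contains length) then d.insert length [elem]
      else d.modify length [] (fun v => v ++ [elem])) PySem.Dict.empty)
    = (lst.map (fun e => (PySem.Str.len e, e))).foldl
        (fun d p => d.modify p.1 [] (fun v => v ++ [p.2])) PySem.Dict.empty := by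
  rw [List.foldl_map]
  simp only [lexA_step_eq_modify]

-- B's first pass keeps seen = order; the order list is the ordered dedup of the lengths
lemma lexB_loop_inv (lst : List String) (s : PySem.Set Int) :
    lst.foldl (fun (st : PySem.Set Int × List Int) e =>
      let l := PySem.Str.len e
      if st.1.contains l then st else (PySem.Set.add st.1 l, st.2 ++ [l])) (s, s)
    = (PySem.Set.update s (lst.map PySem.Str.len), PySem.Set.update s (lst.map PySem.Str.len)) := by
  induction lst generalizing s with
  | nil => simp [PySem.Set.update]
  | cons e t ih =>
    have hstep : (fun (st : PySem.Set Int × List Int) e =>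
        let l := PySem.Str.len e
        if st.1.contains l then st else (PySem.Set.add st.1 l, st.2 ++ [l])) (s, s) e
        = (PySem.Set.add s (PySem.Str.len e), PySem.Set.add s (PySem.Str.len e)) := by
      by_cases h : ((e.length : Int)) ∈ s
      · simp [PySem.Set.add, PySem.Str.len, h]
      · simp [PySem.Set.add, PySem.Str.len, h]
    simp only [List.foldl_cons, hstep, ih]
    simp [PySem.Set.update]

-- B's loop started from the empty set/list
lemma lexB_loop (lst : List String) :
    lst.foldl (fun (st : PySem.Set Int × List Int) e =>
      let l := PySem.Str.len e
      if st.1.contains l then st else (PySem.Set.add st.1 l, st.2 ++ [l]))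
      (PySem.Set.empty, [])
    = (PySem.Set.update ([] : PySem.Set Int) (lst.map PySem.Str.len),
       PySem.Set.update ([] : PySem.Set Int) (lst.map PySem.Str.len)) :=
  lexB_loop_inv lst []

theorem lex_equal (lst : List String) :
    lexicographic_ordering lst = lexicographic_ordering_alt lst := by
  unfold lexicographic_ordering lexicographic_ordering_alt lexGroupByLength lexStringSorting
  rw [lexA_dict_eq]
  simp only [lexB_loop]
  set pairs := lst.map (fun e => (PySem.Str.len e, e)) with hp
  set D := pairs.foldl (fun d p => d.modify p.1 [] (fun v => v ++ [p.2])) PySem.Dict.empty with hD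
  have hkeys : D.keys = PySem.Set.update ([] : PySem.Set Int) (lst.map PySem.Str.len) := by
    rw [hD]
    rw [PySem.Dict.keys_foldl_modify_key pairs Prod.fst [] (fun _ p v => v ++ [p.2])]
    simp only [hp, List.map_map, PySem.Dict.keys_empty]
    refine congrArg _ (List.map_congr_left fun x _ => ?_)
    simp [PySem.Str.len_eq]
  have hnodup : D.keys.Nodup := by
    rw [hD]
    exact PySem.Dict.nodup_keys_foldl_modify_key pairs Prod.fst [] (fun _ p v => v ++ [p.2])
      PySem.Dict.empty (by simp [PySem.Dict.keys_empty])
  have hget : ∀ c : Int, D.getD c [] = lst.filter (fun x => PySem.Str.len x == c) := by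
    intro c
    rw [hD, PySem.Dict.getD_foldl_modify_append]
    simp [hp, List.filter_map, Function.comp_def, List.map_map]
  rw [PySem.Dict.values_eq_map_keys D hnodup [], hkeys, List.map_map]
  apply List.map_congr_left
  intro c _
  simp [Function.comp, hget c]

-- ===== VERDICT (by name: the statement is the Claim_ definition above) =====
theorem lexicographic_ordering_spec : Claim_equal_lexicographic_ordering := by
  intro lst _
  exact lex_equal lst
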